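-- pv_equiv track=rewrite | github.com/OscarTsao/LLM_Projects | 2080_LLM/DataAugmentation_ReDSM5/tools/verify/generate_report.py | categorize_tests
-- ===== SOURCE A (Python) =====
-- def categorize_tests(tests):
--     """Categorize tests by functionality."""
--     categories = {
--         "registry": [],
--         "cli": [],
--         "evidence_only": [],
--         "determinism": [],
--         "variants": [],
--         "combos": [],
--         "sharding": [],
--         "manifests": [],
--         "quality_filter": [],
--         "skip_handling": [],
--         "gpu_cpu": [],
--         "disk_cache": [],
--         "no_training": [],
--         "linting": [],
--         "all_methods": []
--     }
--
--     for test in tests: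
--         nodeid = test.get("nodeid", "")
--
--         if "test_01_registry" in nodeid:
--             categories["registry"].append(test)
--         elif "test_02_cli" in nodeid:
--             categories["cli"].append(test)
--         elif "test_03_evidence" in nodeid:
--             categories["evidence_only"].append(test)
--         elif "test_04_determinism" in nodeid:
--             categories["determinism"].append(test)
--         elif "test_05_variants" in nodeid:
--             categories["variants"].append(test)
--         elif "test_06_combos" in nodeid:
--             categories["combos"].append(test)
--         elif "test_07_sharding" in nodeid:
--             categories["sharding"].append(test)
--         elif "test_08_manifests" in nodeid:
--             categories["manifests"].append(test)
--         elif "test_09_quality" in nodeid: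
--             categories["quality_filter"].append(test)
--         elif "test_10_skip" in nodeid:
--             categories["skip_handling"].append(test)
--         elif "test_11_gpu" in nodeid:
--             categories["gpu_cpu"].append(test)
--         elif "test_12_disk" in nodeid:
--             categories["disk_cache"].append(test)
--         elif "test_13_no_training" in nodeid:
--             categories["no_training"].append(test)
--         elif "test_14_linting" in nodeid:
--             categories["linting"].append(test)
--         elif "test_15_all_methods" in nodeid:
--             categories["all_methods"].append(test)
--
--     return categories
-- ===== SOURCE B (Python) =====
-- _MARKERS = [
--     ("test_01_registry", "registry"),
--     ("test_02_cli", "cli"),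
--     ("test_03_evidence", "evidence_only"),
--     ("test_04_determinism", "determinism"),
--     ("test_05_variants", "variants"),
--     ("test_06_combos", "combos"),
--     ("test_07_sharding", "sharding"),
--     ("test_08_manifests", "manifests"),
--     ("test_09_quality", "quality_filter"),
--     ("test_10_skip", "skip_handling"),
--     ("test_11_gpu", "gpu_cpu"),
--     ("test_12_disk", "disk_cache"),
--     ("test_13_no_training", "no_training"),
--     ("test_14_linting", "linting"),
--     ("test_15_all_methods", "all_methods"),
-- ]
--
--
-- def _label(test):
--     """Index of the test's category: the minimum of ALL marker indices whose
--     marker occurs in the nodeid (None if no marker occurs)."""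
--     nodeid = test.get("nodeid", "")
--     hits = [i for i, (marker, _) in enumerate(_MARKERS) if marker in nodeid]
--     return min(hits) if hits else None
--
--
-- def categorize_tests(tests):
--     """Categorize tests by functionality."""
--     labels = [_label(t) for t in tests]
--     return {key: [t for t, lab in zip(tests, labels) if lab == i]
--             for i, (_, key) in enumerate(_MARKERS)}
-- ===== Notes on version B (the rewrite author's own statement) =====
-- stated objective: alternative
-- what changed: Instead of A's single pass that appends each test into a mutable dict via a 15-branch if/elif chain, B first labels every test with the minimum index of all markers occurring in its nodeid (min over a computed hit set, not a first-match scan), then builds each bucket independently as a filter over the labelled tests.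
import Mathlib
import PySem

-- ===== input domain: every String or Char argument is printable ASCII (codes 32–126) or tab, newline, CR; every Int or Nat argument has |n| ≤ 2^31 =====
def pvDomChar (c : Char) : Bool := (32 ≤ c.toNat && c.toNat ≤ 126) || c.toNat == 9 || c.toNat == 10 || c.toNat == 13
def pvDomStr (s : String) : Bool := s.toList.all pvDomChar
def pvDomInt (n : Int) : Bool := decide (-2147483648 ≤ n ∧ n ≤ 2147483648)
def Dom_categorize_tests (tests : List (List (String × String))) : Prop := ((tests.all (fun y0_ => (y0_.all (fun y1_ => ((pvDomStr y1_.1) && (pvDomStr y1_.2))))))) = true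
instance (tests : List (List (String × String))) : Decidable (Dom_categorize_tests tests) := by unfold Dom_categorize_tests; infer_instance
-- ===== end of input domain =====

-- B replaces A's single-pass if/elif accumulator by two stages: a labelling pass that
-- assigns each test the MINIMUM index of all markers contained in its nodeid, then one
-- filter per category collecting its tests (alternative decomposition, same cost).

-- ===== PORT A =====
-- test.get("nodeid", "")  (first match in the association list)
def catA_nodeid (test : List (String × String)) : String :=
  (List.lookup "nodeid" test).getD ""

def catA_init : PySem.Dict String (List (List (String × String))) :=
  PySem.Dict.ofList [("registry", []), ("cli", []), ("evidence_only", []),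
    ("determinism", []), ("variants", []), ("combos", []), ("sharding", []),
    ("manifests", []), ("quality_filter", []), ("skip_handling", []), ("gpu_cpu", []),
    ("disk_cache", []), ("no_training", []), ("linting", []), ("all_methods", [])]

def catA_step (d : PySem.Dict String (List (List (String × String))))
    (test : List (String × String)) : PySem.Dict String (List (List (String × String))) :=
  let nodeid := catA_nodeid test
  if PySem.Str.isIn "test_01_registry" nodeid then d.modify "registry" [] (· ++ [test])
  else if PySem.Str.isIn "test_02_cli" nodeid then d.modify "cli" [] (· ++ [test])
  else if PySem.Str.isIn "test_03_evidence" nodeid then d.modify "evidence_only" [] (· ++ [test])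
  else if PySem.Str.isIn "test_04_determinism" nodeid then d.modify "determinism" [] (· ++ [test])
  else if PySem.Str.isIn "test_05_variants" nodeid then d.modify "variants" [] (· ++ [test])
  else if PySem.Str.isIn "test_06_combos" nodeid then d.modify "combos" [] (· ++ [test])
  else if PySem.Str.isIn "test_07_sharding" nodeid then d.modify "sharding" [] (· ++ [test])
  else if PySem.Str.isIn "test_08_manifests" nodeid then d.modify "manifests" [] (· ++ [test])
  else if PySem.Str.isIn "test_09_quality" nodeid then d.modify "quality_filter" [] (· ++ [test])
  else if PySem.Str.isIn "test_10_skip" nodeid then d.modify "skip_handling" [] (· ++ [test])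
  else if PySem.Str.isIn "test_11_gpu" nodeid then d.modify "gpu_cpu" [] (· ++ [test])
  else if PySem.Str.isIn "test_12_disk" nodeid then d.modify "disk_cache" [] (· ++ [test])
  else if PySem.Str.isIn "test_13_no_training" nodeid then d.modify "no_training" [] (· ++ [test])
  else if PySem.Str.isIn "test_14_linting" nodeid then d.modify "linting" [] (· ++ [test])
  else if PySem.Str.isIn "test_15_all_methods" nodeid then d.modify "all_methods" [] (· ++ [test])
  else d

def categorize_tests (tests : List (List (String × String))) :
    List (String × List (List (String × String))) :=
  (tests.foldl catA_step catA_init).items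

-- ===== PORT B =====
def catB_table : List (String × String) :=
  [("test_01_registry", "registry"), ("test_02_cli", "cli"),
   ("test_03_evidence", "evidence_only"), ("test_04_determinism", "determinism"),
   ("test_05_variants", "variants"), ("test_06_combos", "combos"),
   ("test_07_sharding", "sharding"), ("test_08_manifests", "manifests"),
   ("test_09_quality", "quality_filter"), ("test_10_skip", "skip_handling"),
   ("test_11_gpu", "gpu_cpu"), ("test_12_disk", "disk_cache"),
   ("test_13_no_training", "no_training"), ("test_14_linting", "linting"),
   ("test_15_all_methods", "all_methods")]

-- hits = [i for i, (marker, _) in enumerate(_MARKERS) if marker in nodeid]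
-- return min(hits) if hits else None     (min? [] = none)
def catB_label (test : List (String × String)) : Option Int :=
  let nodeid := (List.lookup "nodeid" test).getD ""
  let hits := ((PySem.List.enumerate catB_table 0).filter
      (fun p => PySem.Str.isIn p.2.1 nodeid)).map (·.1)
  PySem.List.min? hits (fun x => x)

-- labels = [_label(t) for t in tests]
-- {key: [t for t, lab in zip(tests, labels) if lab == i] for i, (_, key) in enumerate(_MARKERS)}
def categorize_tests_alt (tests : List (List (String × String))) :
    List (String × List (List (String × String))) :=
  let labels := tests.map catB_label
  (PySem.List.enumerate catB_table 0).map (fun p =>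
    (p.2.2, ((tests.zip labels).filter (fun q => q.2 == some p.1)).map (·.1)))

-- ===== PRECONDITION & SPEC =====
def Spec_categorize_tests (tests : List (List (String × String))) (out : List (String × List (List (String × String)))) : Prop := out = categorize_tests_alt tests
instance (tests : List (List (String × String))) (out : List (String × List (List (String × String)))) : Decidable (Spec_categorize_tests tests out) := by unfold Spec_categorize_tests; infer_instance

-- ===== CLAIM (what is proved, stated in full; the proofs are below) =====
def Claim_equal_categorize_tests : Prop := ∀ (tests : List (List (String × String))), Dom_categorize_tests tests → Spec_categorize_tests tests (categorize_tests tests)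

-- ===== LEMMAS AND PROOFS =====

-- first marker of the table occurring in the test's nodeid, with its index
def catF (test : List (String × String)) : Option (Int × (String × String)) :=
  (PySem.List.enumerate catB_table 0).find?
    (fun p => PySem.Str.isIn p.2.1 ((List.lookup "nodeid" test).getD ""))

-- the (category, test) pairs A's loop appends, in order
def catG (tests : List (List (String × String))) : List (String × List (String × String)) :=
  tests.filterMap (fun t => (catF t).map (fun p => (p.2.2, t)))

lemma catA_step_eq_catF (d : PySem.Dict String (List (List (String × String))))
    (test : List (String × String)) :
    catA_step d test =
      match catF test with
      | some p => d.modify p.2.2 [] (· ++ [test])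
      | none => d := by
  simp only [catA_step, catA_nodeid, catF, catB_table, PySem.List.enumerate]
  by_cases h1 : PySem.Str.isIn "test_01_registry" ((List.lookup "nodeid" test).getD "") = true
  · simp_all [List.find?]
  · simp only [Bool.not_eq_true] at h1
    by_cases h2 : PySem.Str.isIn "test_02_cli" ((List.lookup "nodeid" test).getD "") = true
    · simp_all [List.find?]
    · simp only [Bool.not_eq_true] at h2
      by_cases h3 : PySem.Str.isIn "test_03_evidence" ((List.lookup "nodeid" test).getD "") = true
      · simp_all [List.find?]
      · simp only [Bool.not_eq_true] at h3
        by_cases h4 : PySem.Str.isIn "test_04_determinism" ((List.lookup "nodeid" test).getD "") = true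
        · simp_all [List.find?]
        · simp only [Bool.not_eq_true] at h4
          by_cases h5 : PySem.Str.isIn "test_05_variants" ((List.lookup "nodeid" test).getD "") = true
          · simp_all [List.find?]
          · simp only [Bool.not_eq_true] at h5
            by_cases h6 : PySem.Str.isIn "test_06_combos" ((List.lookup "nodeid" test).getD "") = true
            · simp_all [List.find?]
            · simp only [Bool.not_eq_true] at h6
              by_cases h7 : PySem.Str.isIn "test_07_sharding" ((List.lookup "nodeid" test).getD "") = true
              · simp_all [List.find?]
              · simp only [Bool.not_eq_true] at h7
                by_cases h8 : PySem.Str.isIn "test_08_manifests" ((List.lookup "nodeid" test).getD "") = true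
                · simp_all [List.find?]
                · simp only [Bool.not_eq_true] at h8
                  by_cases h9 : PySem.Str.isIn "test_09_quality" ((List.lookup "nodeid" test).getD "") = true
                  · simp_all [List.find?]
                  · simp only [Bool.not_eq_true] at h9
                    by_cases h10 : PySem.Str.isIn "test_10_skip" ((List.lookup "nodeid" test).getD "") = true
                    · simp_all [List.find?]
                    · simp only [Bool.not_eq_true] at h10
                      by_cases h11 : PySem.Str.isIn "test_11_gpu" ((List.lookup "nodeid" test).getD "") = true
                      · simp_all [List.find?]
                      · simp only [Bool.not_eq_true] at h11
                        by_cases h12 : PySem.Str.isIn "test_12_disk" ((List.lookup "nodeid" test).getD "") = true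
                        · simp_all [List.find?]
                        · simp only [Bool.not_eq_true] at h12
                          by_cases h13 : PySem.Str.isIn "test_13_no_training" ((List.lookup "nodeid" test).getD "") = true
                          · simp_all [List.find?]
                          · simp only [Bool.not_eq_true] at h13
                            by_cases h14 : PySem.Str.isIn "test_14_linting" ((List.lookup "nodeid" test).getD "") = true
                            · simp_all [List.find?]
                            · simp only [Bool.not_eq_true] at h14
                              by_cases h15 : PySem.Str.isIn "test_15_all_methods" ((List.lookup "nodeid" test).getD "") = true
                              · simp_all [List.find?]
                              · simp only [Bool.not_eq_true] at h15
                                simp_all [List.find?]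


lemma foldl_min_of_le (a : Int) (l : List Int) (h : ∀ x ∈ l, a ≤ x) :
    l.foldl min a = a := by
  induction l with
  | nil => rfl
  | cons x xs ih =>
    simp only [List.foldl_cons, min_eq_left (h x (by simp))]
    exact ih (fun y hy => h y (by simp [hy]))

lemma min?_map_fst_filter {β : Type} (l : List (Int × β)) (p : Int × β → Bool)
    (h : l.Pairwise (fun a b => a.1 < b.1)) :
    PySem.List.min? ((l.filter p).map (·.1)) (fun x => x) = (l.find? p).map (·.1) := by
  induction l with
  | nil => rfl
  | cons a t ih =>
    rcases List.pairwise_cons.mp h with ⟨ha, ht⟩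
    by_cases hp : p a = true
    · rw [List.filter_cons_of_pos hp, List.map_cons, PySem.List.min?_id_cons,
        List.find?_cons_of_pos hp, Option.map_some]
      congr 1
      apply foldl_min_of_le
      intro x hx
      rcases List.mem_map.mp hx with ⟨q, hq, rfl⟩
      exact le_of_lt (ha q (List.mem_of_mem_filter hq))
    · rw [List.filter_cons_of_neg (by simp [hp]), List.find?_cons_of_neg (by simp [hp])]
      exact ih ht

lemma catB_label_eq_catF (test : List (String × String)) :
    catB_label test = (catF test).map (·.1) := by
  unfold catB_label catF
  exact min?_map_fst_filter _ _ (PySem.List.pairwise_lt_enumerate _ _)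

lemma foldl_catA_eq_catG (tests : List (List (String × String)))
    (d : PySem.Dict String (List (List (String × String)))) :
    tests.foldl catA_step d =
      (catG tests).foldl (fun d q => d.modify q.1 [] (· ++ [q.2])) d := by
  induction tests generalizing d with
  | nil => rfl
  | cons t ts ih =>
    simp only [List.foldl_cons, catA_step_eq_catF, catG, List.filterMap_cons]
    cases hF : catF t with
    | none => simpa [catG] using ih d
    | some p => simpa [catG] using ih (d.modify p.2.2 [] (· ++ [t]))

lemma set_update_of_subset {α : Type} [BEq α] [LawfulBEq α] (s : PySem.Set α)
    (l : List α) (h : ∀ x ∈ l, x ∈ s) : PySem.Set.update s l = s := by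
  induction l generalizing s with
  | nil => rfl
  | cons x xs ih =>
    have : PySem.Set.add s x = s := PySem.Set.add_of_mem (h x (by simp))
    simp only [PySem.Set.update, List.foldl_cons] at *
    rw [this]
    exact ih s (fun y hy => h y (by simp [hy]))

lemma catG_keys_mem (tests : List (List (String × String))) :
    ∀ k ∈ (catG tests).map (·.1), k ∈ catA_init.keys := by
  intro k hk
  rcases List.mem_map.mp hk with ⟨q, hq, rfl⟩
  rcases List.mem_filterMap.mp hq with ⟨t, _, hmap⟩
  cases hF : catF t with
  | none => simp [hF] at hmap
  | some p =>
    simp only [hF, Option.map_some, Option.some.injEq] at hmap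
    subst hmap
    have hp := List.mem_of_find?_eq_some hF
    simp only [catB_table, PySem.List.enumerate, List.mem_cons, List.not_mem_nil, or_false] at hp
    rcases hp with h | h | h | h | h | h | h | h | h | h | h | h | h | h | h <;>
      subst h <;> exact of_decide_eq_true rfl

-- per-bucket agreement: B's zip-filter bucket for index i is A's appended list for key k
lemma bucket_eq (tests : List (List (String × String))) (i : Int) (k : String)
    (hik : ∀ p ∈ PySem.List.enumerate catB_table 0, (p.1 == i) = (p.2.2 == k)) :
    ((tests.zip (tests.map catB_label)).filter (fun q => q.2 == some i)).map (·.1)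
      = ((catG tests).filter (fun q => q.1 == k)).map (·.2) := by
  induction tests with
  | nil => rfl
  | cons t ts ih =>
    simp only [List.map_cons, List.zip_cons_cons, List.filter_cons, catG, List.filterMap_cons]
    rw [catB_label_eq_catF]
    cases hF : catF t with
    | none =>
      simpa [catG] using ih
    | some p =>
      have hp : p ∈ PySem.List.enumerate catB_table 0 := List.mem_of_find?_eq_some hF
      have hikp := hik p hp
      simp only [Option.map_some]
      by_cases hi : (p.1 == i) = true
      · have hk2 : (p.2.2 == k) = true := by rw [← hikp]; exact hi
        simp [hi, hk2]
        exact ih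
      · have hk2 : (p.2.2 == k) = false := by rw [← hikp]; simpa using hi
        simp [hi, hk2]
        exact ih

-- ===== VERDICT (by name: the statement is the Claim_ definition above) =====
theorem categorize_tests_spec : Claim_equal_categorize_tests := by
  intro tests _
  unfold Spec_categorize_tests categorize_tests
  rw [foldl_catA_eq_catG]
  have hnd : catA_init.keys.Nodup := by decide
  have hkeys :
      ((catG tests).foldl (fun d q => d.modify q.1 [] (· ++ [q.2])) catA_init).keys
        = catA_init.keys := by
    rw [PySem.Dict.keys_foldl_modify_key (catG tests) (·.1) [] (fun _ q v => v ++ [q.2]) catA_init]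
    exact set_update_of_subset _ _ (catG_keys_mem tests)
  rw [PySem.Dict.items_eq_map_keys _
    (PySem.Dict.nodup_keys_foldl_modify_key (catG tests) (·.1) [] (fun _ q v => v ++ [q.2]) catA_init hnd) []]
  rw [hkeys]
  rw [show catA_init.keys = ["registry", "cli", "evidence_only", "determinism", "variants", "combos", "sharding", "manifests", "quality_filter", "skip_handling", "gpu_cpu", "disk_cache", "no_training", "linting", "all_methods"] from rfl]
  unfold categorize_tests_alt
  simp only [catB_table, PySem.List.enumerate, List.map_cons, List.map_nil,
    PySem.Dict.getD_foldl_modify_append, List.cons.injEq, Prod.mk.injEq]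
  simp only [true_and, and_true]
  refine ⟨?_, ?_, ?_, ?_, ?_, ?_, ?_, ?_, ?_, ?_, ?_, ?_, ?_, ?_, ?_⟩
  · rw [bucket_eq tests (0 : Int) "registry" (by decide)]; rfl
  · rw [bucket_eq tests (0 + 1 : Int) "cli" (by decide)]; rfl
  · rw [bucket_eq tests (0 + 1 + 1 : Int) "evidence_only" (by decide)]; rfl
  · rw [bucket_eq tests (0 + 1 + 1 + 1 : Int) "determinism" (by decide)]; rfl
  · rw [bucket_eq tests (0 + 1 + 1 + 1 + 1 : Int) "variants" (by decide)]; rfl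
  · rw [bucket_eq tests (0 + 1 + 1 + 1 + 1 + 1 : Int) "combos" (by decide)]; rfl
  · rw [bucket_eq tests (0 + 1 + 1 + 1 + 1 + 1 + 1 : Int) "sharding" (by decide)]; rfl
  · rw [bucket_eq tests (0 + 1 + 1 + 1 + 1 + 1 + 1 + 1 : Int) "manifests" (by decide)]; rfl
  · rw [bucket_eq tests (0 + 1 + 1 + 1 + 1 + 1 + 1 + 1 + 1 : Int) "quality_filter" (by decide)]; rfl
  · rw [bucket_eq tests (0 + 1 + 1 + 1 + 1 + 1 + 1 + 1 + 1 + 1 : Int) "skip_handling" (by decide)]; rfl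
  · rw [bucket_eq tests (0 + 1 + 1 + 1 + 1 + 1 + 1 + 1 + 1 + 1 + 1 : Int) "gpu_cpu" (by decide)]; rfl
  · rw [bucket_eq tests (0 + 1 + 1 + 1 + 1 + 1 + 1 + 1 + 1 + 1 + 1 + 1 : Int) "disk_cache" (by decide)]; rfl
  · rw [bucket_eq tests (0 + 1 + 1 + 1 + 1 + 1 + 1 + 1 + 1 + 1 + 1 + 1 + 1 : Int) "no_training" (by decide)]; rfl
  · rw [bucket_eq tests (0 + 1 + 1 + 1 + 1 + 1 + 1 + 1 + 1 + 1 + 1 + 1 + 1 + 1 : Int) "linting" (by decide)]; rfl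
  · rw [bucket_eq tests (0 + 1 + 1 + 1 + 1 + 1 + 1 + 1 + 1 + 1 + 1 + 1 + 1 + 1 + 1 : Int) "all_methods" (by decide)]; rfl
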